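-- pv_equiv track=rewrite | github.com/JuanNavarro-DD/WAPFHackathon-DataDucks | keywords/main.py | return_questions
-- ===== SOURCE A (Python) =====
-- def return_questions(keyword:str) -> list:
--     '''
--     Pass a transcript of keywords
--     return a set of questions to ask
--     '''
--     #TODO: update question set.
--     questions = [{'q':'What is your emergency?', 'qtype': ['basic']},
--     {'q':'Where are you located right now?', 'qtype': ['basic']},
--     {'q':'Can you provide the address or nearest intersection?', 'qtype': ['basic']},
--     {'q':'Are you calling from a mobile phone or a landline?', 'qtype': ['basic']},
--     {'q':'How many people are involved or injured?', 'qtype': ['basic']},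
--     {'q':'Is anyone in immediate danger?', 'qtype': ['basic']},
--     {'q':'Are there any weapons involved or present at the scene?', 'qtype': ['basic']},
--     {'q':'Is the situation still ongoing, or has it already occurred?', 'qtype': ['basic']},
--     {'q':'Is the person conscious and breathing?', 'qtype': ['basic']},
--     {'q':'Do you know CPR or any first aid that could be administered?', 'qtype': ['basic']},
--     {'q':'Is there anything else important responders should know?', 'qtype': ['basic']},
--     {'q':'What is your emergency?', 'qtype':['robbery']},
--     {'q':'Where is the location of the robbery?', 'qtype':['robbery']},
--     {'q':'Can you describe the suspects?', 'qtype':['robbery']},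
--     {'q':'Do you know if the suspects are still at the scene?', 'qtype':['robbery']},
--     {'q':'Are there any injuries?', 'qtype':['robbery']},
--     {'q':'Did you see or hear anything else that might be relevant?', 'qtype':['robbery']},
--     {'q':'Is anyone else with you?', 'qtype':['robbery']},
--     {'q':'Are the suspects still armed?', 'qtype':['robbery']},
--     {'q':'Are you in a safe place now?', 'qtype':['robbery']},
--     {'q':'Have the suspects made any demands or threats?', 'qtype':['robbery']},
--     {'q':'Can you lock yourself in a secure room or area?', 'qtype':['robbery']},
--     {'q':'Are there security cameras in the area that might have captured the incident?', 'qtype':['robbery']},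
--     {'q': 'What is your emergency?', 'qtype': ['suspicious person']},
--     {'q': 'Where is the location of the suspicious person?', 'qtype': ['suspicious person']},
--     {'q': 'Can you describe the suspicious person?', 'qtype': ['suspicious person']},
--     {'q': 'What is the person doing that makes them suspicious?', 'qtype': ['suspicious person']},
--     {'q': 'Is the person alone, or are there others with them?', 'qtype': ['suspicious person']},
--     {'q': 'Do you feel threatened or unsafe because of this person\'s behavior?', 'qtype': ['suspicious person']},
--     {'q': 'Has the person approached you or anyone else?', 'qtype': ['suspicious person']},
--     {'q': 'Do you know if the person is armed?', 'qtype': ['suspicious person']},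
--     {'q': 'Have you seen the person before in the area?', 'qtype': ['suspicious person']},
--     {'q': 'Are there any specific actions or statements made by the person that concern you?', 'qtype': ['suspicious person']},
--     {'q': 'Have you observed the person entering or leaving any buildings or vehicles?', 'qtype': ['suspicious person']},
--     {'q': 'Are there any security cameras in the area that might have captured the person\'s activities?', 'qtype': ['suspicious person']},
--     {'q':'What is your emergency?', 'qtype':['domestic violence']},
--     {'q':'Are you in a safe place right now?', 'qtype':['domestic violence']},
--     {'q':'Is anyone injured?', 'qtype':['domestic violence']},
--     {'q':'Can you tell me what happened?', 'qtype':['domestic violence']},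
--     {'q':'Who is the perpetrator?', 'qtype':['domestic violence']},
--     {'q':'Is the perpetrator still present?', 'qtype':['domestic violence']},
--     {'q':'Is there a weapon involved?', 'qtype':['domestic violence']},
--     {'q':'Have there been previous incidents of violence?', 'qtype':['domestic violence']},
--     {'q':'Are there children or other vulnerable individuals present?', 'qtype':['domestic violence']},
--     {'q':'Do you have a safe place to go if you need to leave?', 'qtype':['domestic violence']},
--     {'q':'Have you contacted any friends, family members, or support services for assistance?', 'qtype':['domestic violence']},
--     {'q':'Would you like to speak with a counselor or advocate for additional support?', 'qtype':['domestic violence']},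
--     {'q':'Is there anything else you think is important for responders to know?', 'qtype':['domestic violence']}
--     ]
--     to_send = []
--     for q in questions:
--         if keyword in q['qtype']:
--             to_send.append(q['q'])
--
--     if len(to_send) == 0:
--         for q in questions:
--             if "basic" in q['qtype']:
--                 to_send.append(q['q'])
--     return to_send
-- ===== SOURCE B (Python) =====
-- def return_questions(keyword: str) -> list:
--     '''
--     Pass a transcript of keywords
--     return a set of questions to ask
--     '''
--     grouped = {
--         'basic': [
--             'What is your emergency?',
--             'Where are you located right now?',
--             'Can you provide the address or nearest intersection?',
--             'Are you calling from a mobile phone or a landline?',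
--             'How many people are involved or injured?',
--             'Is anyone in immediate danger?',
--             'Are there any weapons involved or present at the scene?',
--             'Is the situation still ongoing, or has it already occurred?',
--             'Is the person conscious and breathing?',
--             'Do you know CPR or any first aid that could be administered?',
--             'Is there anything else important responders should know?',
--         ],
--         'robbery': [
--             'What is your emergency?',
--             'Where is the location of the robbery?',
--             'Can you describe the suspects?',
--             'Do you know if the suspects are still at the scene?',
--             'Are there any injuries?',
--             'Did you see or hear anything else that might be relevant?',
--             'Is anyone else with you?',
--             'Are the suspects still armed?',
--             'Are you in a safe place now?',
--             'Have the suspects made any demands or threats?',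
--             'Can you lock yourself in a secure room or area?',
--             'Are there security cameras in the area that might have captured the incident?',
--         ],
--         'suspicious person': [
--             'What is your emergency?',
--             'Where is the location of the suspicious person?',
--             'Can you describe the suspicious person?',
--             'What is the person doing that makes them suspicious?',
--             'Is the person alone, or are there others with them?',
--             "Do you feel threatened or unsafe because of this person's behavior?",
--             'Has the person approached you or anyone else?',
--             'Do you know if the person is armed?',
--             'Have you seen the person before in the area?',
--             'Are there any specific actions or statements made by the person that concern you?',
--             'Have you observed the person entering or leaving any buildings or vehicles?',
--             "Are there any security cameras in the area that might have captured the person's activities?",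
--         ],
--         'domestic violence': [
--             'What is your emergency?',
--             'Are you in a safe place right now?',
--             'Is anyone injured?',
--             'Can you tell me what happened?',
--             'Who is the perpetrator?',
--             'Is the perpetrator still present?',
--             'Is there a weapon involved?',
--             'Have there been previous incidents of violence?',
--             'Are there children or other vulnerable individuals present?',
--             'Do you have a safe place to go if you need to leave?',
--             'Have you contacted any friends, family members, or support services for assistance?',
--             'Would you like to speak with a counselor or advocate for additional support?',
--             'Is there anything else you think is important for responders to know?',
--         ],
--     }
--     return grouped.get(keyword, grouped['basic'])
-- ===== Notes on version B (the rewrite author's own statement) =====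
-- stated objective: simpler
-- what changed: Replaces the two scanning loops over the flat question list with a dict grouping questions by qtype and a single keyed lookup with the basics list as default.
import Mathlib
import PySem

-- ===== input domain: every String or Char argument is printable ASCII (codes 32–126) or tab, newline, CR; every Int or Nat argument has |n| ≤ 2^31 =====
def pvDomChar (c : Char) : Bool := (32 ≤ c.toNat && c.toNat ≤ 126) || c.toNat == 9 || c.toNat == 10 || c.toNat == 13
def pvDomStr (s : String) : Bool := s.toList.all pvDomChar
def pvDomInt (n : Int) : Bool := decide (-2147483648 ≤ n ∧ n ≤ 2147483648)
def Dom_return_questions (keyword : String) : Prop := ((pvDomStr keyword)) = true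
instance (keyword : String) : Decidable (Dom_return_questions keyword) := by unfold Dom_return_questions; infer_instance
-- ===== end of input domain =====

-- B rewrites A's two scanning loops as a single keyed lookup in a dict grouping the
-- questions by qtype, with the basics list as the default (objective: simpler).

-- ===== PORT A =====
-- each question dict {'q': …, 'qtype': […]} is ported as the pair (q, qtype)
def pvQuestionsA : List (String × List String) :=
  [("What is your emergency?", ["basic"]),
   ("Where are you located right now?", ["basic"]),
   ("Can you provide the address or nearest intersection?", ["basic"]),
   ("Are you calling from a mobile phone or a landline?", ["basic"]),
   ("How many people are involved or injured?", ["basic"]),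
   ("Is anyone in immediate danger?", ["basic"]),
   ("Are there any weapons involved or present at the scene?", ["basic"]),
   ("Is the situation still ongoing, or has it already occurred?", ["basic"]),
   ("Is the person conscious and breathing?", ["basic"]),
   ("Do you know CPR or any first aid that could be administered?", ["basic"]),
   ("Is there anything else important responders should know?", ["basic"]),
   ("What is your emergency?", ["robbery"]),
   ("Where is the location of the robbery?", ["robbery"]),
   ("Can you describe the suspects?", ["robbery"]),
   ("Do you know if the suspects are still at the scene?", ["robbery"]),
   ("Are there any injuries?", ["robbery"]),
   ("Did you see or hear anything else that might be relevant?", ["robbery"]),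
   ("Is anyone else with you?", ["robbery"]),
   ("Are the suspects still armed?", ["robbery"]),
   ("Are you in a safe place now?", ["robbery"]),
   ("Have the suspects made any demands or threats?", ["robbery"]),
   ("Can you lock yourself in a secure room or area?", ["robbery"]),
   ("Are there security cameras in the area that might have captured the incident?", ["robbery"]),
   ("What is your emergency?", ["suspicious person"]),
   ("Where is the location of the suspicious person?", ["suspicious person"]),
   ("Can you describe the suspicious person?", ["suspicious person"]),
   ("What is the person doing that makes them suspicious?", ["suspicious person"]),
   ("Is the person alone, or are there others with them?", ["suspicious person"]),
   ("Do you feel threatened or unsafe because of this person's behavior?", ["suspicious person"]),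
   ("Has the person approached you or anyone else?", ["suspicious person"]),
   ("Do you know if the person is armed?", ["suspicious person"]),
   ("Have you seen the person before in the area?", ["suspicious person"]),
   ("Are there any specific actions or statements made by the person that concern you?", ["suspicious person"]),
   ("Have you observed the person entering or leaving any buildings or vehicles?", ["suspicious person"]),
   ("Are there any security cameras in the area that might have captured the person's activities?", ["suspicious person"]),
   ("What is your emergency?", ["domestic violence"]),
   ("Are you in a safe place right now?", ["domestic violence"]),
   ("Is anyone injured?", ["domestic violence"]),
   ("Can you tell me what happened?", ["domestic violence"]),
   ("Who is the perpetrator?", ["domestic violence"]),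
   ("Is the perpetrator still present?", ["domestic violence"]),
   ("Is there a weapon involved?", ["domestic violence"]),
   ("Have there been previous incidents of violence?", ["domestic violence"]),
   ("Are there children or other vulnerable individuals present?", ["domestic violence"]),
   ("Do you have a safe place to go if you need to leave?", ["domestic violence"]),
   ("Have you contacted any friends, family members, or support services for assistance?", ["domestic violence"]),
   ("Would you like to speak with a counselor or advocate for additional support?", ["domestic violence"]),
   ("Is there anything else you think is important for responders to know?", ["domestic violence"])]

def return_questions (keyword : String) : List String :=
  let questions := pvQuestionsA
  let to_send := questions.foldl (fun acc q => if keyword ∈ q.2 then acc ++ [q.1] else acc) []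
  if to_send.length = 0 then
    questions.foldl (fun acc q => if "basic" ∈ q.2 then acc ++ [q.1] else acc) to_send
  else to_send

-- ===== PORT B =====
def pvBasicB : List String :=
  ["What is your emergency?",
   "Where are you located right now?",
   "Can you provide the address or nearest intersection?",
   "Are you calling from a mobile phone or a landline?",
   "How many people are involved or injured?",
   "Is anyone in immediate danger?",
   "Are there any weapons involved or present at the scene?",
   "Is the situation still ongoing, or has it already occurred?",
   "Is the person conscious and breathing?",
   "Do you know CPR or any first aid that could be administered?",
   "Is there anything else important responders should know?"]

def pvGroupedB : PySem.Dict String (List String) :=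
  PySem.Dict.ofList
    [("basic", pvBasicB),
     ("robbery",
      ["What is your emergency?",
       "Where is the location of the robbery?",
       "Can you describe the suspects?",
       "Do you know if the suspects are still at the scene?",
       "Are there any injuries?",
       "Did you see or hear anything else that might be relevant?",
       "Is anyone else with you?",
       "Are the suspects still armed?",
       "Are you in a safe place now?",
       "Have the suspects made any demands or threats?",
       "Can you lock yourself in a secure room or area?",
       "Are there security cameras in the area that might have captured the incident?"]),
     ("suspicious person",
      ["What is your emergency?",
       "Where is the location of the suspicious person?",
       "Can you describe the suspicious person?",
       "What is the person doing that makes them suspicious?",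
       "Is the person alone, or are there others with them?",
       "Do you feel threatened or unsafe because of this person's behavior?",
       "Has the person approached you or anyone else?",
       "Do you know if the person is armed?",
       "Have you seen the person before in the area?",
       "Are there any specific actions or statements made by the person that concern you?",
       "Have you observed the person entering or leaving any buildings or vehicles?",
       "Are there any security cameras in the area that might have captured the person's activities?"]),
     ("domestic violence",
      ["What is your emergency?",
       "Are you in a safe place right now?",
       "Is anyone injured?",
       "Can you tell me what happened?",
       "Who is the perpetrator?",
       "Is the perpetrator still present?",
       "Is there a weapon involved?",
       "Have there been previous incidents of violence?",
       "Are there children or other vulnerable individuals present?",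
       "Do you have a safe place to go if you need to leave?",
       "Have you contacted any friends, family members, or support services for assistance?",
       "Would you like to speak with a counselor or advocate for additional support?",
       "Is there anything else you think is important for responders to know?"])]

def return_questions_alt (keyword : String) : List String :=
  PySem.Dict.getD pvGroupedB keyword pvBasicB

-- ===== PRECONDITION & SPEC =====
def Spec_return_questions (keyword : String) (out : List String) : Prop := out = return_questions_alt keyword
instance (keyword : String) (out : List String) : Decidable (Spec_return_questions keyword out) := by unfold Spec_return_questions; infer_instance

-- ===== CLAIM (what is proved, stated in full; the proofs are below) =====
def Claim_equal_return_questions : Prop := ∀ (keyword : String), Dom_return_questions keyword → Spec_return_questions keyword (return_questions keyword)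

-- ===== LEMMAS AND PROOFS =====

-- ===== VERDICT (by name: the statement is the Claim_ definition above) =====
theorem pvGroupedB_keys : ∀ p ∈ pvGroupedB.items,
    p.1 = "basic" ∨ p.1 = "robbery" ∨ p.1 = "suspicious person" ∨ p.1 = "domestic violence" := by
  decide

theorem return_questions_spec : Claim_equal_return_questions := by
  intro keyword _
  unfold Spec_return_questions
  by_cases h1 : keyword = "basic"
  · subst h1; decide
  · by_cases h2 : keyword = "robbery"
    · subst h2; decide
    · by_cases h3 : keyword = "suspicious person"
      · subst h3; decide
      · by_cases h4 : keyword = "domestic violence"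
        · subst h4; decide
        · have hfind : List.find? (fun p => p.1 == keyword) pvGroupedB.items = none := by
            rw [List.find?_eq_none]
            intro p hp
            simp only [beq_iff_eq]
            rcases pvGroupedB_keys p hp with h | h | h | h <;> rw [h] <;> intro e <;>
              first
                | exact h1 e.symm
                | exact h2 e.symm
                | exact h3 e.symm
                | exact h4 e.symm
          simp [return_questions, return_questions_alt, pvQuestionsA,
            PySem.Dict.getD, PySem.Dict.get?, List.foldl, hfind, h1, h2, h3, h4, pvBasicB]
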